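-- pv_equiv track=rewrite | github.com/Hullaah/binary_trees | play.py | prefix_score
-- ===== SOURCE A (Python) =====
-- def prefix_score(arr = [1, 2, 3]):
--     i = 1
--     ans = []
--     while i <= len(arr):
--         tmp = arr[:i]
--         j = 0
--         while j < len(tmp):
--             tmp[j] += max(tmp)
--             j += 1
--         ans.append(sum(tmp))
--         i += 1
--     return ans
-- ===== SOURCE B (Python) =====
-- def prefix_score(arr = [1, 2, 3]):
--     n = len(arr)
--     ans = []
--     for i in range(1, n + 1):
--         # suffix maxima of the original prefix arr[:i]
--         suf = [0] * i
--         m = arr[i - 1]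
--         for j in range(i - 1, -1, -1):
--             m = max(m, arr[j])
--             suf[j] = m
--         # one forward pass: running max of already-modified elements
--         modmax = None
--         total = 0
--         for j in range(i):
--             m = suf[j] if modmax is None else max(modmax, suf[j])
--             v = arr[j] + m
--             modmax = v if modmax is None else max(modmax, v)
--             total += v
--         ans.append(total)
--     return ans
-- ===== Notes on version B (the rewrite author's own statement) =====
-- stated objective: faster
-- what changed: Instead of recomputing max(tmp) over the whole partially-modified prefix at every inner step, B precomputes one backward pass of suffix maxima of the originals and does one forward pass maintaining the running max of already-modified elements, so each prefix costs O(n) instead of O(n^2).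
import Mathlib
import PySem

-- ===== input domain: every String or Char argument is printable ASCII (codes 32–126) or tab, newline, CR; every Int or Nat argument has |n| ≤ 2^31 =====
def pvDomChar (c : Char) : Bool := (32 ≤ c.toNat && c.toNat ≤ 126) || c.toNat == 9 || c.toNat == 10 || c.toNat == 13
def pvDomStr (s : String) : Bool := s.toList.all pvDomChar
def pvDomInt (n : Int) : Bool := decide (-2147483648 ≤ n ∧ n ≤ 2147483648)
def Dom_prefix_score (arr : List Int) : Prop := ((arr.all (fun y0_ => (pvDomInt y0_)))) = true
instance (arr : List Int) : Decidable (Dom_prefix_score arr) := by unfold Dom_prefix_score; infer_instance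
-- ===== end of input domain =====

-- B replaces A's per-step recomputation of max(tmp) by, for each prefix, one backward pass of
-- suffix maxima of the originals plus one forward pass tracking the running max of the
-- already-modified elements (objective: faster).

-- ===== PORT A =====
-- inner while loop: `while j < len(tmp): tmp[j] += max(tmp); j += 1`
def pvInnerA (tmp : List Int) (j : Nat) : List Int :=
  if h : j < tmp.length then
    let m := (PySem.List.max? tmp (fun y => y)).getD 0
    pvInnerA (tmp.set j (tmp.getD j 0 + m)) (j + 1)
  else tmp
termination_by tmp.length - j
decreasing_by simp_all; omega

-- outer while loop: `while i <= len(arr): … ; i += 1`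
def pvOuterA (arr : List Int) (i : Nat) (ans : List Int) : List Int :=
  if i ≤ arr.length then
    pvOuterA arr (i + 1) (ans ++ [(pvInnerA (arr.take i) 0).sum])
  else ans
termination_by arr.length + 1 - i

def prefix_score (arr : List Int) : List Int := pvOuterA arr 1 []

-- ===== PORT B =====
-- Source B's backward loop: suf[j] = max(arr[j], suf[j+1]), built back-to-front
def pvSufMaxes (l : List Int) : List Int :=
  match l with
  | [] => []
  | x :: xs =>
    match pvSufMaxes xs with
    | [] => [x]
    | m :: t => (max x m) :: m :: t

-- Source B's forward-pass loop body; state = (modmax : Option Int, total)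
def pvStepB (st : Option Int × Int) (p : Int × Int) : Option Int × Int :=
  let m := match st.1 with | none => p.2 | some mm => max mm p.2
  let v := p.1 + m
  ((match st.1 with | none => some v | some mm => some (max mm v)), st.2 + v)

def prefix_score_alt (arr : List Int) : List Int :=
  (List.range arr.length).map (fun k =>
    let pre := arr.take (k + 1)
    ((pre.zip (pvSufMaxes pre)).foldl pvStepB (none, 0)).2)

-- ===== PRECONDITION & SPEC =====
def Spec_prefix_score (arr : List Int) (out : List Int) : Prop := out = prefix_score_alt arr
instance (arr : List Int) (out : List Int) : Decidable (Spec_prefix_score arr out) := by unfold Spec_prefix_score; infer_instance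

-- ===== CLAIM (what is proved, stated in full; the proofs are below) =====
def Claim_equal_prefix_score : Prop := ∀ (arr : List Int), Dom_prefix_score arr → Spec_prefix_score arr (prefix_score arr)

-- ===== LEMMAS AND PROOFS =====

-- functional reformulation of A's inner loop: `done` = already-modified prefix
def pvProcess (done rest : List Int) : List Int :=
  match rest with
  | [] => done
  | x :: xs =>
    let m := (PySem.List.max? (done ++ x :: xs) (fun y => y)).getD 0
    pvProcess (done ++ [x + m]) xs

-- running maximum as an Option (none iff the list is empty) = B's `modmax` after a list
def pvOmax (l : List Int) : Option Int :=
  l.foldl (fun o x => some (match o with | none => x | some m => max m x)) none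

theorem pvInnerA_eq_process (rest : List Int) : ∀ done : List Int,
    pvInnerA (done ++ rest) done.length = pvProcess done rest := by
  induction rest with
  | nil => intro done; simp [pvInnerA, pvProcess]
  | cons x xs ih =>
    intro done
    rw [pvInnerA]
    have h : done.length < (done ++ x :: xs).length := by simp
    simp only [dif_pos h]
    have hg : (done ++ x :: xs).getD done.length 0 = x := by
      simp [List.getD]
    have hs : ∀ v : Int, (done ++ x :: xs).set done.length v = (done ++ [v]) ++ xs := by
      intro v
      rw [show done.length = done.length + 0 by rfl, List.set_append_right]
      · simp
      · omega
    rw [hg, hs]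
    rw [show done.length + 1 = (done ++ [x + (PySem.List.max? (done ++ x :: xs) (fun y => y)).getD 0]).length by simp]
    rw [ih]
    rfl

theorem pvFoldlMaxComm (l : List Int) : ∀ a b : Int, max a (l.foldl max b) = l.foldl max (max a b) := by
  induction l with
  | nil => intro a b; rfl
  | cons c cs ih =>
    intro a b
    simp only [List.foldl_cons]
    rw [ih a (max b c), max_assoc]

theorem pvOmax_some (l : List Int) : ∀ a : Int,
    l.foldl (fun o x => some (match o with | none => x | some m => max m x)) (some a)
      = some (l.foldl max a) := by
  induction l with
  | nil => intro a; rfl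
  | cons c cs ih => intro a; simpa using ih (max a c)

theorem pvOmax_cons (a : Int) (l : List Int) : pvOmax (a :: l) = some (l.foldl max a) := by
  simp [pvOmax, pvOmax_some]

theorem pvOmax_append_singleton (l : List Int) (v : Int) :
    pvOmax (l ++ [v]) = some (match pvOmax l with | none => v | some m => max m v) := by
  simp [pvOmax, List.foldl_append]

theorem pvMaxBridge (done : List Int) (x : Int) (xs : List Int) :
    (PySem.List.max? (done ++ x :: xs) (fun y => y)).getD 0
      = match pvOmax done with | none => xs.foldl max x | some mm => max mm (xs.foldl max x) := by
  cases done with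
  | nil => simp [PySem.List.max?_id_cons, pvOmax]
  | cons d ds =>
    rw [List.cons_append, PySem.List.max?_id_cons, pvOmax_cons]
    simp only [Option.getD_some]
    rw [List.foldl_append, List.foldl_cons, ← pvFoldlMaxComm]

theorem pvSufMaxes_cons (x : Int) (xs : List Int) :
    pvSufMaxes (x :: xs) = (xs.foldl max x) :: pvSufMaxes xs := by
  induction xs generalizing x with
  | nil => rfl
  | cons y ys ih =>
    rw [pvSufMaxes, ih y]
    simp only [List.foldl_cons]
    rw [← pvFoldlMaxComm]

theorem pvFold_eq_process (rest : List Int) : ∀ done : List Int,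
    (rest.zip (pvSufMaxes rest)).foldl pvStepB (pvOmax done, done.sum)
      = (pvOmax (pvProcess done rest), (pvProcess done rest).sum) := by
  induction rest with
  | nil => intro done; rfl
  | cons x xs ih =>
    intro done
    rw [pvSufMaxes_cons, List.zip_cons_cons, List.foldl_cons]
    have hm : pvStepB (pvOmax done, done.sum) (x, xs.foldl max x)
        = (pvOmax (done ++ [x + (PySem.List.max? (done ++ x :: xs) (fun y => y)).getD 0]),
           (done ++ [x + (PySem.List.max? (done ++ x :: xs) (fun y => y)).getD 0]).sum) := by
      rw [pvMaxBridge, pvOmax_append_singleton]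
      simp only [pvStepB, List.sum_append, List.sum_cons, List.sum_nil]
      cases h : pvOmax done <;> simp
    rw [hm, ih]
    rfl

theorem pvOuterA_eq (arr : List Int) : ∀ (k i : Nat) (ans : List Int), arr.length + 1 - i = k →
    pvOuterA arr i ans
      = ans ++ (List.range' i k).map (fun j => (pvInnerA (arr.take j) 0).sum) := by
  intro k
  induction k with
  | zero =>
    intro i ans hk
    rw [pvOuterA]
    rw [if_neg (by omega)]
    simp
  | succ k ih =>
    intro i ans hk
    rw [pvOuterA, if_pos (by omega)]
    rw [ih (i + 1) _ (by omega)]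
    rw [List.range'_succ]
    simp

-- ===== VERDICT (by name: the statement is the Claim_ definition above) =====
theorem prefix_score_spec : Claim_equal_prefix_score := by
  intro arr _
  unfold Spec_prefix_score prefix_score prefix_score_alt
  rw [pvOuterA_eq arr arr.length 1 [] (by omega)]
  rw [List.range'_eq_map_range, List.map_map, List.nil_append]
  apply List.map_congr_left
  intro k _
  have h1 : pvInnerA (arr.take (k + 1)) 0 = pvProcess [] (arr.take (k + 1)) := by
    have := pvInnerA_eq_process (arr.take (k + 1)) []
    simpa using this
  have h2 := pvFold_eq_process (arr.take (k + 1)) []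
  simp only [pvOmax, List.foldl_nil, List.sum_nil] at h2
  simp only [Function.comp_apply, show 1 + k = k + 1 by omega, h1, h2]
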